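-- pv_equiv track=rewrite | github.com/aashir023/ecommerce_chatbot | src/ingest_data.py | build_specs_summary
-- ===== SOURCE A (Python) =====
-- def build_specs_summary(spec_pairs: list[tuple[str, str]], max_chars: int = 1800) -> str:
--     """Build a compact single-line summary for Pinecone metadata/context."""
--     if not spec_pairs:
--         return ""
--     chunks: list[str] = []
--     total = 0
--     for key, value in spec_pairs:
--         part = f"{key}: {value}"
--         new_total = total + len(part) + (3 if chunks else 0)
--         if new_total > max_chars:
--             break
--         chunks.append(part)
--         total = new_total
--     return " | ".join(chunks)
-- ===== SOURCE B (Python) =====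
-- def build_specs_summary(spec_pairs: list[tuple[str, str]], max_chars: int = 1800) -> str:
--     """Build a compact single-line summary for Pinecone metadata/context."""
--     parts = [f"{key}: {value}" for key, value in spec_pairs]
--     # cum[i] = len(" | ".join(parts[:i+1])): prefix sums of len(part) + 3, offset by -3
--     cum = []
--     run = -3
--     for p in parts:
--         run += len(p) + 3
--         cum.append(run)
--     # cum is nondecreasing, so binary-search the largest k with cum[k-1] <= max_chars
--     lo, hi = 0, len(parts)
--     while lo < hi:
--         mid = (lo + hi + 1) // 2
--         if cum[mid - 1] <= max_chars:
--             lo = mid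
--         else:
--             hi = mid - 1
--     return " | ".join(parts[:lo])
-- ===== Notes on version B (the rewrite author's own statement) =====
-- stated objective: alternative
-- what changed: B replaces A's greedy scan with a running total and break by a prefix-sum pass that records the joined length of every prefix, then a binary search for the largest prefix within max_chars (correct because the cumulative joined lengths are nondecreasing), then one slice-and-join.
import Mathlib
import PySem

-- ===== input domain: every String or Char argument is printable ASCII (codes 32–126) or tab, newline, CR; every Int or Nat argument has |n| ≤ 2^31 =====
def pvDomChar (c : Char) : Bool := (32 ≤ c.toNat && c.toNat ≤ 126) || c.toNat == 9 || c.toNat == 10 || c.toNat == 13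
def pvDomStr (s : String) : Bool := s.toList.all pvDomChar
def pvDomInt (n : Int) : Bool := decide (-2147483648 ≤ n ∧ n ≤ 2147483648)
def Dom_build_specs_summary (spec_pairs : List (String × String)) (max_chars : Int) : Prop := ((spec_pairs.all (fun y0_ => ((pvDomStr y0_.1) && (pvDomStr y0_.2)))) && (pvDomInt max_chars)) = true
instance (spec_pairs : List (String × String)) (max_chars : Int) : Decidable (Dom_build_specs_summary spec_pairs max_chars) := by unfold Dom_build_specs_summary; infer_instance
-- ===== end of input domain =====

-- B replaces A's greedy scan-with-break by prefix sums of joined lengths plus a binary search for the cutoff (alternative algorithm, same asymptotic cost).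


-- ===== PORT A =====
-- the for-loop of A: state = (chunks, total); break returns the current chunks
def bssALoop (pairs : List (String × String)) (chunks : List String) (total : Int) (max_chars : Int) : List String :=
  match pairs with
  | [] => chunks
  | (key, value) :: rest =>
    let part := key ++ ": " ++ value
    let new_total := total + PySem.Str.len part + (if chunks = [] then 0 else 3)
    if new_total > max_chars then chunks
    else bssALoop rest (chunks ++ [part]) new_total max_chars

def build_specs_summary (spec_pairs : List (String × String)) (max_chars : Int) : String :=
  if spec_pairs = [] then ""
  else PySem.Str.join " | " (bssALoop spec_pairs [] 0 max_chars)

-- ===== PORT B =====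
-- the `cum` for-loop of B: each entry is run after `run += len(p) + 3`
def bssCum (parts : List String) (run : Int) : List Int :=
  match parts with
  | [] => []
  | p :: rest =>
    let r := run + PySem.Str.len p + 3
    r :: bssCum rest r

-- the while-loop of B: lo/hi are Python ints that stay in [0, len(parts)], kept as Nat
-- ((lo+hi+1)//2 on nonnegatives = Nat division); cum[mid-1] is always in range in B,
-- ported as getD with an unreachable default.
def bssSearch (cum : List Int) (max_chars : Int) (lo hi : Nat) : Nat :=
  if lo < hi then
    let mid := (lo + hi + 1) / 2
    if cum.getD (mid - 1) 0 ≤ max_chars then bssSearch cum max_chars mid hi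
    else bssSearch cum max_chars lo (mid - 1)
  else lo
termination_by hi - lo
decreasing_by all_goals omega

def build_specs_summary_alt (spec_pairs : List (String × String)) (max_chars : Int) : String :=
  let parts := spec_pairs.map (fun kv => kv.1 ++ ": " ++ kv.2)
  let cum := bssCum parts (-3)
  let lo := bssSearch cum max_chars 0 parts.length
  -- parts[:lo] with 0 ≤ lo : exact as take
  PySem.Str.join " | " (parts.take lo)

-- ===== PRECONDITION & SPEC =====
def Spec_build_specs_summary (spec_pairs : List (String × String)) (max_chars : Int) (out : String) : Prop := out = build_specs_summary_alt spec_pairs max_chars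
instance (spec_pairs : List (String × String)) (max_chars : Int) (out : String) : Decidable (Spec_build_specs_summary spec_pairs max_chars out) := by unfold Spec_build_specs_summary; infer_instance

-- ===== CLAIM (what is proved, stated in full; the proofs are below) =====
def Claim_equal_build_specs_summary : Prop := ∀ (spec_pairs : List (String × String)) (max_chars : Int), Dom_build_specs_summary spec_pairs max_chars → Spec_build_specs_summary spec_pairs max_chars (build_specs_summary spec_pairs max_chars)

-- ===== LEMMAS AND PROOFS =====

theorem bssCum_length (parts : List String) (run : Int) :
    (bssCum parts run).length = parts.length := by
  induction parts generalizing run with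
  | nil => rfl
  | cons p rest ih => simp [bssCum, ih]

theorem str_len_nonneg (s : String) : 0 ≤ PySem.Str.len s := by
  simp [PySem.Str.len_eq]

theorem bssCum_run_le (parts : List String) (run : Int) (j : Nat) (hj : j < parts.length) :
    run ≤ (bssCum parts run).getD j 0 := by
  induction parts generalizing run j with
  | nil => simp at hj
  | cons p rest ih =>
    have hp := str_len_nonneg p
    cases j with
    | zero => simp [bssCum]; omega
    | succ j' =>
      simp only [bssCum, List.getD_cons_succ]
      have := ih (run + PySem.Str.len p + 3) j' (by simpa using hj)
      omega

theorem bssCum_mono (parts : List String) (run : Int) (i j : Nat)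
    (hij : i ≤ j) (hj : j < parts.length) :
    (bssCum parts run).getD i 0 ≤ (bssCum parts run).getD j 0 := by
  induction parts generalizing run i j with
  | nil => simp at hj
  | cons p rest ih =>
    cases i with
    | zero =>
      cases j with
      | zero => exact le_refl _
      | succ j' =>
        simp only [bssCum, List.getD_cons_zero, List.getD_cons_succ]
        exact bssCum_run_le rest _ j' (by simpa using hj)
    | succ i' =>
      cases j with
      | zero => omega
      | succ j' =>
        simp only [bssCum, List.getD_cons_succ]
        exact ih _ i' j' (by omega) (by simpa using hj)

-- A's loop accepts exactly the longest prefix whose cumulative new_total values stay ≤ max_chars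
theorem bssALoop_eq_take (max_chars : Int) :
    ∀ (pairs : List (String × String)) (chunks : List String) (total : Int),
    bssALoop pairs chunks total max_chars
      = chunks ++ (pairs.map (fun kv => kv.1 ++ ": " ++ kv.2)).take
          ((bssCum (pairs.map (fun kv => kv.1 ++ ": " ++ kv.2))
              (if chunks = [] then total - 3 else total)).takeWhile
            (fun c => decide (c ≤ max_chars))).length := by
  intro pairs
  induction pairs with
  | nil => intro chunks total; simp [bssALoop, bssCum]
  | cons kv rest ih =>
    intro chunks total
    obtain ⟨key, value⟩ := kv
    unfold bssALoop
    dsimp only [List.map]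
    rw [bssCum]
    have hrun : (if chunks = [] then total - 3 else total) + PySem.Str.len (key ++ ": " ++ value) + 3
        = total + PySem.Str.len (key ++ ": " ++ value) + (if chunks = [] then 0 else 3) := by
      rcases eq_or_ne chunks [] with h | h
      · simp [h]; omega
      · simp [h]
    rw [hrun]
    by_cases hbr : total + PySem.Str.len (key ++ ": " ++ value) + (if chunks = [] then 0 else 3) > max_chars
    · rw [if_pos hbr, List.takeWhile_cons]
      rw [show (decide (total + PySem.Str.len (key ++ ": " ++ value) + (if chunks = [] then 0 else 3) ≤ max_chars)) = false from by simp only [decide_eq_false_iff_not, not_le]; omega]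
      simp
    · rw [if_neg hbr, List.takeWhile_cons]
      rw [show (decide (total + PySem.Str.len (key ++ ": " ++ value) + (if chunks = [] then 0 else 3) ≤ max_chars)) = true from by simp only [decide_eq_true_eq]; omega]
      rw [ih (chunks ++ [key ++ ": " ++ value])]
      simp

-- facts about the takeWhile cutoff t := (l.takeWhile (· ≤ mc)).length
theorem tw_le_length (mc : Int) (l : List Int) :
    (l.takeWhile (fun c => decide (c ≤ mc))).length ≤ l.length := by
  simpa using List.IsPrefix.length_le (List.takeWhile_prefix _)

theorem tw_getD_le (mc : Int) :
    ∀ (l : List Int) (i : Nat), i < (l.takeWhile (fun c => decide (c ≤ mc))).length →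
      l.getD i 0 ≤ mc := by
  intro l
  induction l with
  | nil => simp [List.takeWhile]
  | cons a rest ih =>
    intro i hi
    by_cases h : a ≤ mc
    · cases i with
      | zero => simpa using h
      | succ i' =>
        simp only [List.takeWhile, h, decide_true, List.length_cons] at hi
        exact ih i' (by omega)
    · simp [List.takeWhile, h] at hi
  
theorem tw_stop (mc : Int) :
    ∀ (l : List Int),
      (l.takeWhile (fun c => decide (c ≤ mc))).length < l.length →
      ¬ l.getD (l.takeWhile (fun c => decide (c ≤ mc))).length 0 ≤ mc := by
  intro l
  induction l with
  | nil => simp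
  | cons a rest ih =>
    intro hlt
    by_cases h : a ≤ mc
    · simp only [List.takeWhile, h, decide_true, List.length_cons, List.getD_cons_succ] at hlt ⊢
      exact ih (by omega)
    · simpa [List.takeWhile, h] using h

-- the binary search finds exactly the takeWhile cutoff on a monotone list
theorem bssSearch_eq (cum : List Int) (mc : Int)
    (hmono : ∀ i j : Nat, i ≤ j → j < cum.length → cum.getD i 0 ≤ cum.getD j 0) :
    ∀ (d lo hi : Nat), hi - lo ≤ d →
      lo ≤ (cum.takeWhile (fun c => decide (c ≤ mc))).length →
      (cum.takeWhile (fun c => decide (c ≤ mc))).length ≤ hi →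
      hi ≤ cum.length →
      bssSearch cum mc lo hi = (cum.takeWhile (fun c => decide (c ≤ mc))).length := by
  intro d
  induction d with
  | zero =>
    intro lo hi hd hlo hhi _
    rw [bssSearch]
    have hnlt : ¬ lo < hi := by omega
    simp only [hnlt, if_false]
    omega
  | succ d ih =>
    intro lo hi hd hlo hhi hlen
    rw [bssSearch]
    by_cases hlh : lo < hi
    · simp only [hlh, if_true]
      by_cases hc : cum.getD ((lo + hi + 1) / 2 - 1) 0 ≤ mc
      · simp only [hc, if_true]
        have hmt : (lo + hi + 1) / 2 ≤ (cum.takeWhile (fun c => decide (c ≤ mc))).length := by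
          by_contra hlt
          have h2 : (cum.takeWhile (fun c => decide (c ≤ mc))).length < cum.length := by omega
          exact tw_stop mc cum h2
            (le_trans (hmono _ ((lo + hi + 1) / 2 - 1) (by omega) (by omega)) hc)
        exact ih ((lo + hi + 1) / 2) hi (by omega) hmt hhi hlen
      · simp only [hc, if_false]
        have hmt : (cum.takeWhile (fun c => decide (c ≤ mc))).length ≤ (lo + hi + 1) / 2 - 1 := by
          by_contra hlt
          exact hc (tw_getD_le mc cum ((lo + hi + 1) / 2 - 1) (by omega))
        exact ih lo ((lo + hi + 1) / 2 - 1) (by omega) hlo hmt (by omega)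
    · simp only [hlh, if_false]
      omega

-- ===== VERDICT (by name: the statement is the Claim_ definition above) =====
theorem build_specs_summary_spec : Claim_equal_build_specs_summary := by
  intro spec_pairs max_chars _
  unfold Spec_build_specs_summary build_specs_summary build_specs_summary_alt
  by_cases h : spec_pairs = []
  · subst h
    simp [bssCum, PySem.Str.join, PySem.Chars.join, List.intercalate]
  · rw [if_neg h]
    show PySem.Str.join " | " (bssALoop spec_pairs [] 0 max_chars)
      = PySem.Str.join " | "
          ((spec_pairs.map (fun kv => kv.1 ++ ": " ++ kv.2)).take
            (bssSearch (bssCum (spec_pairs.map (fun kv => kv.1 ++ ": " ++ kv.2)) (-3)) max_chars 0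
              (spec_pairs.map (fun kv => kv.1 ++ ": " ++ kv.2)).length))
    rw [bssALoop_eq_take]
    have hrun : (if ([] : List String) = [] then (0 : Int) - 3 else 0) = -3 := by norm_num
    rw [hrun]
    have hmono : ∀ i j : Nat, i ≤ j →
        j < (bssCum (spec_pairs.map (fun kv => kv.1 ++ ": " ++ kv.2)) (-3)).length →
        (bssCum (spec_pairs.map (fun kv => kv.1 ++ ": " ++ kv.2)) (-3)).getD i 0
          ≤ (bssCum (spec_pairs.map (fun kv => kv.1 ++ ": " ++ kv.2)) (-3)).getD j 0 := by
      intro i j hij hj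
      exact bssCum_mono _ _ i j hij (by simpa [bssCum_length] using hj)
    rw [bssSearch_eq _ _ hmono (spec_pairs.map (fun kv => kv.1 ++ ": " ++ kv.2)).length 0
      (spec_pairs.map (fun kv => kv.1 ++ ": " ++ kv.2)).length (by omega) (by omega)
      (by have := tw_le_length max_chars (bssCum (spec_pairs.map (fun kv => kv.1 ++ ": " ++ kv.2)) (-3)); simpa [bssCum_length] using this) (by simp [bssCum_length])]
    simp
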